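-- pv_equiv track=rewrite | github.com/pankdm/icfpc-2024 | solvers/3d/clean2.py | postprocess_input
-- ===== SOURCE A (Python) =====
-- def postprocess_value(value):
--     if value in ["*", "=", "<", ">"]:
--         return value
--     elif "*" in value:
--         return "."
--     elif "<" in value:
--         # note: recursive
--         return postprocess_value(value.split("<")[0])
--     elif ">" in value:
--         # note: recursive
--         return postprocess_value(value.split(">")[0])
--     elif "=" in value:
--         return value.split("=")[1]
--     elif value == "":
--         return "."
--     else:
--         return value
--
-- def postprocess_input(cells, overwrites):
--     data = []
--     for y, row in enumerate(cells):
--         values = []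
--         for x, value in enumerate(row):
--             # Process overwrites first
--             key = (x, y)
--             if key in overwrites:
--                 values.append(overwrites[key])
--                 continue
--             after = postprocess_value(value)
--             # print (f" '{value}' -> '{after}' ")
--             values.append(after)
--         # print (values)
--         # max_dx = max(max_dx, len(values))
--         data.append(values)
--     return data
-- ===== SOURCE B (Python) =====
-- def postprocess_value(value):
--     if value in ("*", "=", "<", ">"):
--         return value
--     if "*" in value:
--         return "."
--     # single left-to-right scan: keep everything before the first time-travel arrow
--     core = ""
--     for ch in value:
--         if ch in "<>":
--             break
--         core += ch
--     if core == "=":          # a lone '=' left of the first arrow is the operator itself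
--         return "="
--     if "=" in core:
--         return core.split("=")[1]
--     if core == "":
--         return "."
--     return core
--
-- def postprocess_input(cells, overwrites):
--     return [
--         [
--             overwrites[(x, y)] if (x, y) in overwrites else postprocess_value(value)
--             for x, value in enumerate(row)
--         ]
--         for y, row in enumerate(cells)
--     ]
-- ===== Notes on version B (the rewrite author's own statement) =====
-- stated objective: alternative
-- what changed: postprocess_value's tail recursion over repeated str.split calls is replaced by a single left-to-right scan that cuts the cell at its first '<' or '>' arrow, and the nested append loops of postprocess_input become list comprehensions.
-- intended difference: On cells that start with "><", contain no '*' and are not overwritten, A's recursion bottoms out on the leftover '>' and returns ">", while B returns ".", the intended cleanup of a cell with no payload before its first arrow. — e.g. on postprocess_input([["><"]], []): A returns [[">"]], B returns [["."]]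
import Mathlib
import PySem

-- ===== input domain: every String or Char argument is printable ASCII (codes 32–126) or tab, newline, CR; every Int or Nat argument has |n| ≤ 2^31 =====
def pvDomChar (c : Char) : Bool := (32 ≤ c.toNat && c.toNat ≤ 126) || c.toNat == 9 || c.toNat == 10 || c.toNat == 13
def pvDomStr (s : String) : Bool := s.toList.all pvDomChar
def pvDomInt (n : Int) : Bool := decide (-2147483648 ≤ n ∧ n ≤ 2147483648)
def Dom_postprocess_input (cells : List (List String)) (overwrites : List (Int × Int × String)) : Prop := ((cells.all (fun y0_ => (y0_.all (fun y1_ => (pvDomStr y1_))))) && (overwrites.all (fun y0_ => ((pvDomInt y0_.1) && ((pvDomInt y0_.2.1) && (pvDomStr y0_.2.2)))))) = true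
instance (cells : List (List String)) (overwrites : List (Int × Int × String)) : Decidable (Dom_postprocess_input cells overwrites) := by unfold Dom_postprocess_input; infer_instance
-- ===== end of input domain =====

-- B rewrites the recursive arrow-stripping helper as one left-to-right scan that cuts the cell at its
-- first '<' or '>' (same cost class; alternative decomposition); return values only, nothing is mutated.

-- ===== PORT A =====
-- lemmas the port needs for termination (cited in decreasing_by): value.split(c)[0] is the prefix of
-- value before the first occurrence of the single character c, and it is strictly shorter when c occurs.
theorem pvA_go_single (c : Char) : ∀ (fuel : Nat) (l cur : List Char) (acc : List (List Char)), l.length < fuel →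
    ∃ rest, PySem.Chars.splitOn.go [c] fuel l cur acc
      = acc.reverse ++ (cur.reverse ++ l.takeWhile (fun a => !(a == c))) :: rest := by
  intro fuel
  induction fuel with
  | zero => intro l cur acc h; omega
  | succ fuel ih =>
    intro l cur acc h
    match l with
    | [] =>
      refine ⟨[], ?_⟩
      rw [PySem.Chars.splitOn.go.eq_def]
      simp
    | ch :: rest =>
      rw [PySem.Chars.splitOn.go.eq_def]
      simp only [List.length_cons] at h
      by_cases hc : ch = c
      · subst hc
        simp only [List.isPrefixOf, Bool.and_true, beq_self_eq_true, if_pos, List.takeWhile_cons,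
          Bool.not_true, List.length_cons, List.drop_succ_cons]
        simp only [List.length_nil, List.drop_zero, Bool.false_eq_true, if_false]
        obtain ⟨r, hr⟩ := ih rest [] (cur.reverse :: acc) (by omega)
        refine ⟨rest.takeWhile (fun a => !(a == ch)) :: r, ?_⟩
        rw [hr]; simp
      · have hcb : (ch == c) = false := by simp [hc]
        have hne : ¬ ((c == ch) = true) := by
          simp only [beq_iff_eq]
          exact fun e => hc e.symm
        simp only [List.isPrefixOf, Bool.and_true]
        rw [if_neg hne]
        simp only [List.takeWhile_cons, hcb, Bool.not_false, if_pos]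
        obtain ⟨r, hr⟩ := ih rest (ch :: cur) acc (by omega)
        refine ⟨r, ?_⟩
        rw [hr]; simp

theorem pvA_split_first (v : String) (c : Char) (s : String) (hs : s.toList = [c]) :
    ((PySem.List.pyGet? ((PySem.Str.split? v s).getD []) 0).getD "").toList
      = v.toList.takeWhile (fun a => !(a == c)) := by
  have hsplit : PySem.Str.split? v s = some ((PySem.Chars.splitOn v.toList [c]).map String.ofList) := by
    simp [PySem.Str.split?, PySem.Chars.split?, hs]
  obtain ⟨rest, hr⟩ := pvA_go_single c (v.toList.length + 1) v.toList [] [] (by omega)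
  have hs2 : PySem.Chars.splitOn v.toList [c]
      = (v.toList.takeWhile (fun a => !(a == c))) :: rest := by
    unfold PySem.Chars.splitOn
    rw [hr]; simp
  rw [hsplit, hs2]
  simp [PySem.List.pyGet?, PySem.List.pyIdx?]

theorem pvA_takeWhile_lt (l : List Char) (c : Char) (h : c ∈ l) :
    (l.takeWhile (fun a => !(a == c))).length < l.length := by
  induction l with
  | nil => cases h
  | cons ch rest ih =>
    by_cases hc : ch = c
    · subst hc; simp
    · have : c ∈ rest := by
        cases h with
        | head => exact absurd rfl hc
        | tail _ h => exact h
      simp only [List.takeWhile_cons, List.length_cons]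
      split
      · simpa using Nat.succ_lt_succ (ih this)
      · simp

theorem pvA_mem_of_isIn (v : String) (c : Char) (s : String) (hs : s.toList = [c])
    (h : PySem.Str.isIn s v = true) : c ∈ v.toList := by
  have h2 := (PySem.Str.isIn_iff_infix s v).mp h
  rw [hs] at h2
  exact h2.subset (List.mem_singleton_self c)

def postprocess_value (value : String) : String :=
  if value ∈ (["*", "=", "<", ">"] : List String) then value
  else if PySem.Str.isIn "*" value then "."
  else if h1 : PySem.Str.isIn "<" value then
    -- value.split("<")[0]: a split with a nonempty separator always yields at least one piece
    postprocess_value ((PySem.List.pyGet? ((PySem.Str.split? value "<").getD []) 0).getD "")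
  else if h2 : PySem.Str.isIn ">" value then
    -- value.split(">")[0]
    postprocess_value ((PySem.List.pyGet? ((PySem.Str.split? value ">").getD []) 0).getD "")
  else if PySem.Str.isIn "=" value then
    -- value.split("=")[1]: "=" in value guarantees at least two pieces
    (PySem.List.pyGet? ((PySem.Str.split? value "=").getD []) 1).getD ""
  else if value = "" then "."
  else value
termination_by value.toList.length
decreasing_by
  · rw [pvA_split_first value '<' "<" rfl]
    exact pvA_takeWhile_lt _ _ (pvA_mem_of_isIn value '<' "<" rfl h1)
  · rw [pvA_split_first value '>' ">" rfl]
    exact pvA_takeWhile_lt _ _ (pvA_mem_of_isIn value '>' ">" rfl h2)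

def postprocess_input (cells : List (List String)) (overwrites : List (Int × Int × String)) : List (List String) :=
  -- the dict argument: keys (x, y), values the replacement string
  let ov := PySem.Dict.ofList (overwrites.map (fun t => ((t.1, t.2.1), t.2.2)))
  (PySem.List.enumerate cells 0).foldl (fun data yrow =>
    data ++ [(PySem.List.enumerate yrow.2 0).foldl (fun values xv =>
      if ov.contains (xv.1, yrow.1) then
        -- key in overwrites: the lookup below cannot fail
        values ++ [(ov.get? (xv.1, yrow.1)).getD ""]
      else
        values ++ [postprocess_value xv.2]) []]) []

-- ===== PORT B =====
-- Source B's scan «for ch in value: if ch in "<>": break; core += ch» as structural recursion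
def pvB_takeCore : List Char → List Char
  | [] => []
  | ch :: rest => if ch = '<' ∨ ch = '>' then [] else ch :: pvB_takeCore rest

def postprocess_value_alt (value : String) : String :=
  if value ∈ (["*", "=", "<", ">"] : List String) then value
  else if PySem.Str.isIn "*" value then "."
  else
    let core : String := String.ofList (pvB_takeCore value.toList)
    if core = "=" then "="
    else if PySem.Str.isIn "=" core then
      -- core.split("=")[1]: "=" in core guarantees at least two pieces
      (PySem.List.pyGet? ((PySem.Str.split? core "=").getD []) 1).getD ""
    else if core = "" then "."
    else core

def postprocess_input_alt (cells : List (List String)) (overwrites : List (Int × Int × String)) : List (List String) :=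
  let ov := PySem.Dict.ofList (overwrites.map (fun t => ((t.1, t.2.1), t.2.2)))
  (PySem.List.enumerate cells 0).map (fun yrow =>
    (PySem.List.enumerate yrow.2 0).map (fun xv =>
      match ov.get? (xv.1, yrow.1) with
      | some s => s
      | none => postprocess_value_alt xv.2))

-- ===== PRECONDITION & SPEC =====
-- On a cell that starts with "><", contains no '*' and is not overwritten, A's recursion bottoms out on
-- the leftover arrow and returns ">", while B returns "." — the intended cleanup of a cell that has no
-- payload before its first arrow.
def D_postprocess_input (cells : List (List String)) (overwrites : List (Int × Int × String)) : Prop :=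
  ∃ y < cells.length, ∃ x < (cells.getD y []).length,
    (['>', '<'] <+: ((cells.getD y []).getD x "").toList
      ∧ PySem.Str.isIn "*" ((cells.getD y []).getD x "") = false
      ∧ ∀ t ∈ overwrites, ¬ (t.1 = (x : Int) ∧ t.2.1 = (y : Int)))
instance (cells : List (List String)) (overwrites : List (Int × Int × String)) : Decidable (D_postprocess_input cells overwrites) := by unfold D_postprocess_input; infer_instance

def Spec_postprocess_input (cells : List (List String)) (overwrites : List (Int × Int × String)) (out : List (List String)) : Prop := ¬ D_postprocess_input cells overwrites → out = postprocess_input_alt cells overwrites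
instance (cells : List (List String)) (overwrites : List (Int × Int × String)) (out : List (List String)) : Decidable (Spec_postprocess_input cells overwrites out) := by unfold Spec_postprocess_input; infer_instance

def pvDiffWitness_postprocess_input : List (List String) × (List (Int × Int × String)) := ([["><"]], [])
def pvDiffWitnessOut_postprocess_input : (List (List String)) × (List (List String)) := ([[">"]], [["."]])

-- ===== CLAIM (what is proved, stated in full; the proofs are below) =====
def Claim_unchanged_postprocess_input : Prop := ∀ (cells : List (List String)) (overwrites : List (Int × Int × String)), Dom_postprocess_input cells overwrites → Spec_postprocess_input cells overwrites (postprocess_input cells overwrites)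
def Claim_changed_postprocess_input : Prop := Dom_postprocess_input (pvDiffWitness_postprocess_input.1) (pvDiffWitness_postprocess_input.2) ∧ D_postprocess_input (pvDiffWitness_postprocess_input.1) (pvDiffWitness_postprocess_input.2) ∧ postprocess_input (pvDiffWitness_postprocess_input.1) (pvDiffWitness_postprocess_input.2) = pvDiffWitnessOut_postprocess_input.1 ∧ postprocess_input_alt (pvDiffWitness_postprocess_input.1) (pvDiffWitness_postprocess_input.2) = pvDiffWitnessOut_postprocess_input.2 ∧ pvDiffWitnessOut_postprocess_input.1 ≠ pvDiffWitnessOut_postprocess_input.2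

def Claim_exact_postprocess_input : Prop := ∀ (cells : List (List String)) (overwrites : List (Int × Int × String)), Dom_postprocess_input cells overwrites → D_postprocess_input cells overwrites → postprocess_input cells overwrites ≠ postprocess_input_alt cells overwrites

-- ===== LEMMAS AND PROOFS =====

-- the tail of both helpers once specials, '*' and the arrows are out of the way
def pvTail (core : String) : String :=
  if core = "=" then "="
  else if PySem.Str.isIn "=" core then
    (PySem.List.pyGet? ((PySem.Str.split? core "=").getD []) 1).getD ""
  else if core = "" then "."
  else core

theorem isIn_single_iff (v : String) (c : Char) (s : String) (hs : s.toList = [c]) :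
    PySem.Str.isIn s v = true ↔ c ∈ v.toList := by
  rw [PySem.Str.isIn_iff_infix, hs]
  constructor
  · exact fun h => h.subset (List.mem_singleton_self c)
  · intro h
    obtain ⟨s1, t1, he⟩ := List.append_of_mem h
    exact ⟨s1, t1, by rw [he]; simp⟩

theorem isIn_false_not_mem (v : String) (c : Char) (s : String) (hs : s.toList = [c])
    (h : PySem.Str.isIn s v = false) : c ∉ v.toList := by
  intro hm
  rw [(isIn_single_iff v c s hs).mpr hm] at h
  exact Bool.noConfusion h

theorem not_isIn_of_not_mem (v : String) (c : Char) (s : String) (hs : s.toList = [c])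
    (h : c ∉ v.toList) : ¬ (PySem.Str.isIn s v = true) := by
  intro hh
  exact h ((isIn_single_iff v c s hs).mp hh)

theorem takeCore_no_arrows (l : List Char) (h1 : '<' ∉ l) (h2 : '>' ∉ l) :
    pvB_takeCore l = l := by
  induction l with
  | nil => rfl
  | cons ch rest ih =>
    simp only [List.mem_cons, not_or] at h1 h2
    simp only [pvB_takeCore, if_neg (by tauto : ¬ (ch = '<' ∨ ch = '>'))]
    rw [ih h1.2 h2.2]

theorem takeCore_takeWhile_lt (l : List Char) :
    pvB_takeCore (l.takeWhile (fun a => !(a == '<'))) = pvB_takeCore l := by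
  induction l with
  | nil => rfl
  | cons ch rest ih =>
    by_cases h1 : ch = '<'
    · subst h1; simp [pvB_takeCore]
    · by_cases h2 : ch = '>'
      · subst h2; simp [pvB_takeCore]
      · simp only [List.takeWhile_cons, if_pos (by simp [h1] : (!(ch == '<')) = true)]
        simp only [pvB_takeCore, if_neg (by tauto : ¬ (ch = '<' ∨ ch = '>'))]
        rw [ih]

theorem takeCore_eq_takeWhile_gt (l : List Char) (h : '<' ∉ l) :
    pvB_takeCore l = l.takeWhile (fun a => !(a == '>')) := by
  induction l with
  | nil => rfl
  | cons ch rest ih =>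
    simp only [List.mem_cons, not_or] at h
    by_cases h2 : ch = '>'
    · subst h2; simp [pvB_takeCore]
    · simp only [pvB_takeCore, if_neg (by tauto : ¬ (ch = '<' ∨ ch = '>')),
        List.takeWhile_cons, if_pos (by simp [h2] : (!(ch == '>')) = true)]
      rw [ih h.2]

theorem alt_eq_tail (v : String) (hs : v ∉ (["*", "=", "<", ">"] : List String))
    (hstar : PySem.Str.isIn "*" v = false) :
    postprocess_value_alt v = pvTail (String.ofList (pvB_takeCore v.toList)) := by
  unfold postprocess_value_alt pvTail
  rw [if_neg hs, if_neg (show ¬ (PySem.Str.isIn "*" v = true) by rw [hstar]; simp)]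

theorem pv_tail_of_noarrow (v : String) (hs : v ∉ (["*", "=", "<", ">"] : List String))
    (hstar : PySem.Str.isIn "*" v = false)
    (hlt : '<' ∉ v.toList) (hgt : '>' ∉ v.toList) :
    postprocess_value v = pvTail v := by
  rw [postprocess_value.eq_def]
  rw [if_neg hs, if_neg (show ¬ (PySem.Str.isIn "*" v = true) by rw [hstar]; simp),
    dif_neg (not_isIn_of_not_mem v '<' "<" rfl hlt),
    dif_neg (not_isIn_of_not_mem v '>' ">" rfl hgt)]
  rw [pvTail, if_neg (show ¬ (v = "=") from fun hh => hs (by rw [hh]; decide))]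

theorem pv_eq_spec : postprocess_value "=" = "=" := by
  rw [postprocess_value.eq_def, if_pos (by decide : ("=" : String) ∈ (["*", "=", "<", ">"] : List String))]

theorem pvTail_eq_spec : pvTail "=" = "=" := by
  rw [pvTail, if_pos rfl]

theorem pv_nolt (v : String) (hlt : '<' ∉ v.toList)
    (hstar : PySem.Str.isIn "*" v = false)
    (hs : v ∉ (["*", "=", "<", ">"] : List String)) :
    postprocess_value v = pvTail (String.ofList (pvB_takeCore v.toList)) := by
  by_cases hgt : '>' ∈ v.toList
  · rw [postprocess_value.eq_def]
    rw [if_neg hs, if_neg (show ¬ (PySem.Str.isIn "*" v = true) by rw [hstar]; simp),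
      dif_neg (not_isIn_of_not_mem v '<' "<" rfl hlt),
      dif_pos ((isIn_single_iff v '>' ">" rfl).mpr hgt)]
    have hqt := pvA_split_first v '>' ">" rfl
    have hq : ((PySem.List.pyGet? ((PySem.Str.split? v ">").getD []) 0).getD "")
        = String.ofList (pvB_takeCore v.toList) := by
      apply String.toList_inj.mp
      rw [hqt, String.toList_ofList, takeCore_eq_takeWhile_gt _ hlt]
    rw [hq]
    have hql : (String.ofList (pvB_takeCore v.toList)).toList
        = v.toList.takeWhile (fun a => !(a == '>')) := by
      rw [String.toList_ofList, takeCore_eq_takeWhile_gt _ hlt]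
    have hqlt : '<' ∉ (String.ofList (pvB_takeCore v.toList)).toList := by
      rw [hql]; exact fun hm => hlt ((List.takeWhile_sublist _).subset hm)
    have hqgt : '>' ∉ (String.ofList (pvB_takeCore v.toList)).toList := by
      rw [hql]; intro hm
      simpa using List.mem_takeWhile_imp hm
    have hqstar : PySem.Str.isIn "*" (String.ofList (pvB_takeCore v.toList)) = false := by
      cases hst : PySem.Str.isIn "*" (String.ofList (pvB_takeCore v.toList)) with
      | false => rfl
      | true =>
        exfalso
        have hm := (isIn_single_iff _ '*' "*" rfl).mp hst
        rw [hql] at hm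
        exact isIn_false_not_mem v '*' "*" rfl hstar ((List.takeWhile_sublist _).subset hm)
    by_cases hqe : String.ofList (pvB_takeCore v.toList) = "="
    · rw [hqe, pv_eq_spec, pvTail_eq_spec]
    · have hqs : String.ofList (pvB_takeCore v.toList) ∉ (["*", "=", "<", ">"] : List String) := by
        intro hmem
        simp only [List.mem_cons, List.not_mem_nil, or_false] at hmem
        rcases hmem with h | h | h | h
        · exact isIn_false_not_mem _ '*' "*" rfl hqstar (by rw [h]; decide)
        · exact hqe h
        · exact hqlt (by rw [h]; decide)
        · exact hqgt (by rw [h]; decide)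
      exact pv_tail_of_noarrow _ hqs hqstar hqlt hqgt
  · rw [pv_tail_of_noarrow v hs hstar hlt hgt]
    congr 1
    rw [takeCore_no_arrows _ hlt hgt, String.ofList_toList]

theorem takeWhile_singleton_gt_prefix (l : List Char)
    (h : l.takeWhile (fun a => !(a == '<')) = ['>']) (hm : '<' ∈ l) :
    ['>', '<'] <+: l := by
  match l with
  | [] => cases hm
  | a :: rest =>
    rw [List.takeWhile_cons] at h
    by_cases ha : a = '<'
    · rw [if_neg (by simp [ha])] at h; cases h
    · rw [if_pos (by simp [ha])] at h
      obtain ⟨ha2, h2⟩ := List.cons_eq_cons.mp h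
      subst ha2
      have hmr : '<' ∈ rest := by
        cases hm with
        | tail _ hh => exact hh
      match rest, hmr with
      | b :: r2, hmr =>
        rw [List.takeWhile_cons] at h2
        by_cases hb : b = '<'
        · subst hb; exact ⟨r2, by simp⟩
        · rw [if_pos (by simp [hb])] at h2; cases h2

theorem pv_eq (v : String)
    (hb : ¬ (['>', '<'] <+: v.toList ∧ PySem.Str.isIn "*" v = false)) :
    postprocess_value v = postprocess_value_alt v := by
  by_cases hs : v ∈ (["*", "=", "<", ">"] : List String)
  · rw [postprocess_value.eq_def, postprocess_value_alt, if_pos hs, if_pos hs]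
  · by_cases hstar : PySem.Str.isIn "*" v = true
    · rw [postprocess_value.eq_def, postprocess_value_alt, if_neg hs, if_neg hs, if_pos hstar, if_pos hstar]
    · have hstar' : PySem.Str.isIn "*" v = false := by
        cases h : PySem.Str.isIn "*" v
        · rfl
        · exact absurd h hstar
      rw [alt_eq_tail v hs hstar']
      by_cases hlt : '<' ∈ v.toList
      · rw [postprocess_value.eq_def]
        rw [if_neg hs, if_neg (show ¬ (PySem.Str.isIn "*" v = true) by rw [hstar']; simp),
          dif_pos ((isIn_single_iff v '<' "<" rfl).mpr hlt)]
        have hpt := pvA_split_first v '<' "<" rfl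
        have hp : ((PySem.List.pyGet? ((PySem.Str.split? v "<").getD []) 0).getD "")
            = String.ofList (v.toList.takeWhile (fun a => !(a == '<'))) := by
          apply String.toList_inj.mp
          rw [hpt, String.toList_ofList]
        rw [hp]
        by_cases hp1 : v.toList.takeWhile (fun a => !(a == '<')) = ['>']
        · exact absurd ⟨takeWhile_singleton_gt_prefix v.toList hp1 hlt, hstar'⟩ hb
        · by_cases hp2 : v.toList.takeWhile (fun a => !(a == '<')) = ['=']
          · have h2 : pvB_takeCore v.toList = ['='] := by
              rw [← takeCore_takeWhile_lt, hp2]; rfl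
            rw [hp2, h2]
            have he : String.ofList ['='] = "=" := by decide
            rw [he, pv_eq_spec, pvTail_eq_spec]
          · have hplt : '<' ∉ (String.ofList (v.toList.takeWhile (fun a => !(a == '<')))).toList := by
              rw [String.toList_ofList]
              intro hm
              simpa using List.mem_takeWhile_imp hm
            have hpsub : ∀ a ∈ (String.ofList (v.toList.takeWhile (fun a => !(a == '<')))).toList, a ∈ v.toList := by
              rw [String.toList_ofList]
              exact fun a hm => (List.takeWhile_sublist _).subset hm
            have hpstar : PySem.Str.isIn "*" (String.ofList (v.toList.takeWhile (fun a => !(a == '<')))) = false := by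
              cases hst : PySem.Str.isIn "*" (String.ofList (v.toList.takeWhile (fun a => !(a == '<')))) with
              | false => rfl
              | true =>
                exfalso
                have hm := (isIn_single_iff _ '*' "*" rfl).mp hst
                exact isIn_false_not_mem v '*' "*" rfl hstar' (hpsub _ hm)
            have hlift : ∀ w : List Char, String.ofList (v.toList.takeWhile (fun a => !(a == '<'))) = String.ofList w → v.toList.takeWhile (fun a => !(a == '<')) = w := by
              intro w hw
              have := congrArg String.toList hw
              simpa using this
            have hps : String.ofList (v.toList.takeWhile (fun a => !(a == '<'))) ∉ (["*", "=", "<", ">"] : List String) := by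
              intro hmem
              simp only [List.mem_cons, List.not_mem_nil, or_false] at hmem
              rcases hmem with h | h | h | h
              · exact isIn_false_not_mem _ '*' "*" rfl hpstar (by rw [h]; decide)
              · exact hp2 (hlift ['='] h)
              · exact hplt (by rw [h]; decide)
              · exact hp1 (hlift ['>'] h)
            rw [pv_nolt _ hplt hpstar hps]
            congr 2
            rw [String.toList_ofList, takeCore_takeWhile_lt]
      · exact pv_nolt v hlt hstar' hs

theorem get?_update_none {κ ν : Type} [BEq κ] [LawfulBEq κ] (ps : List (κ × ν)) :
    ∀ (d : PySem.Dict κ ν) (k : κ), (d.update ps).get? k = none →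
    d.get? k = none ∧ ∀ p ∈ ps, p.1 ≠ k := by
  induction ps with
  | nil =>
    intro d k h
    refine ⟨by simpa [PySem.Dict.update] using h, ?_⟩
    intro p hp; cases hp
  | cons q rest ih =>
    intro d k h
    have hstep : d.update (q :: rest) = (d.insert q.1 q.2).update rest := by
      simp [PySem.Dict.update]
    rw [hstep] at h
    obtain ⟨hnone, hrest⟩ := ih _ _ h
    have hq : q.1 ≠ k := by
      intro he
      subst he
      rw [PySem.Dict.get?_insert_self] at hnone
      cases hnone
    refine ⟨?_, ?_⟩
    · rw [PySem.Dict.get?_insert_of_ne (hne := fun e => hq e.symm)] at hnone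
      exact hnone
    · intro p hp
      cases hp with
      | head => exact hq
      | tail _ hp' => exact hrest p hp'

theorem cell_eq (cells : List (List String)) (overwrites : List (Int × Int × String))
    (hnD : ¬ D_postprocess_input cells overwrites)
    (y x : Nat) (hy : y < cells.length) (hx : x < (cells[y]).length)
    (hnone : (PySem.Dict.ofList (overwrites.map (fun t => ((t.1, t.2.1), t.2.2)))).get?
        ((x : Int), (y : Int)) = none) :
    postprocess_value (cells[y][x]) = postprocess_value_alt (cells[y][x]) := by
  apply pv_eq
  rintro ⟨hpre, hst⟩
  apply hnD
  have hrow : cells.getD y [] = cells[y] := by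
    rw [List.getD_eq_getElem?_getD, List.getElem?_eq_getElem hy]; rfl
  have hcell : (cells[y]).getD x "" = cells[y][x] := by
    rw [List.getD_eq_getElem?_getD, List.getElem?_eq_getElem hx]; rfl
  refine ⟨y, hy, x, ?_, ?_, ?_, ?_⟩
  · rw [hrow]; exact hx
  · rw [hrow, hcell]; exact hpre
  · rw [hrow, hcell]; exact hst
  · intro t ht
    rintro ⟨e1, e2⟩
    unfold PySem.Dict.ofList at hnone
    have hall := (get?_update_none (overwrites.map (fun t => ((t.1, t.2.1), t.2.2)))
      PySem.Dict.empty ((x : Int), (y : Int)) hnone).2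
    have hmem : ((t.1, t.2.1), t.2.2) ∈ overwrites.map (fun t => ((t.1, t.2.1), t.2.2)) :=
      List.mem_map_of_mem ht
    exact hall _ hmem (by simp [e1, e2])

theorem input_as_map (cells : List (List String)) (overwrites : List (Int × Int × String)) :
    postprocess_input cells overwrites
      = (PySem.List.enumerate cells 0).map (fun yrow =>
          (PySem.List.enumerate yrow.2 0).map (fun xv =>
            if (PySem.Dict.ofList (overwrites.map (fun t => ((t.1, t.2.1), t.2.2)))).contains (xv.1, yrow.1) then
              ((PySem.Dict.ofList (overwrites.map (fun t => ((t.1, t.2.1), t.2.2)))).get? (xv.1, yrow.1)).getD ""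
            else postprocess_value xv.2)) := by
  unfold postprocess_input
  rw [PySem.List.foldl_append_singleton_eq_map, List.nil_append]
  apply List.map_congr_left
  intro yrow _hyrow
  have hb2 : (fun (values : List String) (xv : Int × String) =>
      if (PySem.Dict.ofList (overwrites.map (fun t => ((t.1, t.2.1), t.2.2)))).contains (xv.1, yrow.1) then
        values ++ [((PySem.Dict.ofList (overwrites.map (fun t => ((t.1, t.2.1), t.2.2)))).get? (xv.1, yrow.1)).getD ""]
      else values ++ [postprocess_value xv.2])
      = (fun values xv => values ++ [if (PySem.Dict.ofList (overwrites.map (fun t => ((t.1, t.2.1), t.2.2)))).contains (xv.1, yrow.1) then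
          ((PySem.Dict.ofList (overwrites.map (fun t => ((t.1, t.2.1), t.2.2)))).get? (xv.1, yrow.1)).getD ""
        else postprocess_value xv.2]) := by
    funext values xv
    split <;> rfl
  rw [hb2, PySem.List.foldl_append_singleton_eq_map, List.nil_append]

theorem get?_update_none_of {κ ν : Type} [BEq κ] [LawfulBEq κ] (ps : List (κ × ν)) :
    ∀ (d : PySem.Dict κ ν) (k : κ), d.get? k = none → (∀ p ∈ ps, p.1 ≠ k) →
    (d.update ps).get? k = none := by
  induction ps with
  | nil => intro d k hd _; simpa [PySem.Dict.update] using hd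
  | cons q rest ih =>
    intro d k hd hall
    have hstep : d.update (q :: rest) = (d.insert q.1 q.2).update rest := by
      simp [PySem.Dict.update]
    rw [hstep]
    apply ih
    · rw [PySem.Dict.get?_insert_of_ne (hne := fun e => hall q List.mem_cons_self e.symm)]
      exact hd
    · exact fun p hp => hall p (List.mem_cons_of_mem q hp)

-- ===== VERDICT (by name: the statement is the Claim_ definition above) =====
theorem postprocess_input_spec : Claim_unchanged_postprocess_input := by
  intro cells overwrites _hdom hnD
  show postprocess_input cells overwrites = postprocess_input_alt cells overwrites
  rw [input_as_map]
  unfold postprocess_input_alt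
  apply List.map_congr_left
  intro yrow hyrow
  obtain ⟨ky, hky, hyeq⟩ := (PySem.List.mem_enumerate_iff cells 0 yrow).mp hyrow
  apply List.map_congr_left
  intro xv hxv
  obtain ⟨kx, hkx, hxeq⟩ := (PySem.List.mem_enumerate_iff yrow.2 0 xv).mp hxv
  cases hg : (PySem.Dict.ofList (overwrites.map (fun t => ((t.1, t.2.1), t.2.2)))).get? (xv.1, yrow.1) with
  | some s =>
    rw [PySem.Dict.contains_eq_isSome_get?, hg]
    simp
  | none =>
    rw [PySem.Dict.contains_eq_isSome_get?, hg]
    simp only [Option.isSome_none, Bool.false_eq_true, if_false]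
    have hyeq1 : yrow.1 = (ky : Int) := by rw [hyeq]; simp
    have hyeq2 : yrow.2 = cells[ky] := by rw [hyeq]
    have hxeq1 : xv.1 = (kx : Int) := by rw [hxeq]; simp
    have hkx' : kx < (cells[ky]).length := by rw [← hyeq2]; exact hkx
    have hxeq2 : xv.2 = cells[ky][kx] := by
      rw [hxeq]
      simp only [hyeq2]
    rw [hxeq2]
    exact cell_eq cells overwrites hnD ky kx hky hkx'
      (by rw [← hxeq1, ← hyeq1]; exact hg)

theorem pv_witness : postprocess_value "><" = ">" := by
  have harg : ((PySem.List.pyGet? ((PySem.Str.split? "><" "<").getD []) 0).getD "") = ">" := by decide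
  rw [postprocess_value.eq_def]
  rw [if_neg (by decide), if_neg (by decide), dif_pos (by decide), harg]
  rw [postprocess_value.eq_def]
  rw [if_pos (by decide)]

theorem postprocess_input_changed : Claim_changed_postprocess_input := by
  unfold Claim_changed_postprocess_input
  refine ⟨by decide, by decide, ?_, by decide, by decide⟩
  show postprocess_input [["><"]] [] = [[">"]]
  unfold postprocess_input
  simp [PySem.List.enumerate, PySem.Dict.ofList, PySem.Dict.update, PySem.Dict.empty,
    PySem.Dict.contains, pv_witness]

theorem postprocess_input_tight : Claim_exact_postprocess_input := by
  intro cells overwrites _dom hD hEq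
  obtain ⟨y, hy, x, hx0, hpre0, hstar0, hunov⟩ := hD
  have hrow : cells.getD y [] = cells[y] := by
    rw [List.getD_eq_getElem?_getD, List.getElem?_eq_getElem hy]; rfl
  rw [hrow] at hx0 hpre0 hstar0
  have hcell : (cells[y]).getD x "" = cells[y][x] := by
    rw [List.getD_eq_getElem?_getD, List.getElem?_eq_getElem hx0]; rfl
  rw [hcell] at hpre0 hstar0
  have hgnone : (PySem.Dict.ofList (overwrites.map (fun t => ((t.1, t.2.1), t.2.2)))).get?
      ((x : Int), (y : Int)) = none := by
    unfold PySem.Dict.ofList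
    apply get?_update_none_of
    · simp [PySem.Dict.get?, PySem.Dict.empty]
    · intro p hp
      obtain ⟨t, ht, rfl⟩ := List.mem_map.mp hp
      intro he
      rw [Prod.mk.injEq] at he
      exact hunov t ht ⟨he.1, he.2⟩
  rw [input_as_map] at hEq
  unfold postprocess_input_alt at hEq
  have h1 := congrArg (fun L => L[y]?) hEq
  simp only [List.getElem?_map, PySem.List.getElem?_enumerate,
    List.getElem?_eq_getElem hy, Option.map_some] at h1
  have h2 := congrArg (fun L => L[x]?) (Option.some.inj h1)
  simp only [List.getElem?_map, PySem.List.getElem?_enumerate,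
    List.getElem?_eq_getElem hx0, Option.map_some, zero_add] at h2
  have h3 := Option.some.inj h2
  rw [PySem.Dict.contains_eq_isSome_get?, hgnone] at h3
  simp only [Option.isSome_none, Bool.false_eq_true, if_false] at h3
  obtain ⟨r, hr⟩ := hpre0
  have hclist : cells[y][x].toList = '>' :: '<' :: r := hr.symm
  have hspec : cells[y][x] ∉ (["*", "=", "<", ">"] : List String) := by
    intro hmem
    have hlen : cells[y][x].toList.length = r.length + 2 := by rw [hclist]; simp
    simp only [List.mem_cons, List.not_mem_nil, or_false] at hmem
    rcases hmem with h | h | h | h <;> (rw [h] at hlen; simp at hlen)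
  have hlt : '<' ∈ cells[y][x].toList := by rw [hclist]; simp
  have hA : postprocess_value (cells[y][x]) = ">" := by
    rw [postprocess_value.eq_def, if_neg hspec,
      if_neg (show ¬ (PySem.Str.isIn "*" (cells[y][x]) = true) by rw [hstar0]; simp),
      dif_pos ((isIn_single_iff _ '<' "<" rfl).mpr hlt)]
    have harg : ((PySem.List.pyGet? ((PySem.Str.split? (cells[y][x]) "<").getD []) 0).getD "") = ">" := by
      apply String.toList_inj.mp
      rw [pvA_split_first (cells[y][x]) '<' "<" rfl, hclist]
      simp
    rw [harg, postprocess_value.eq_def, if_pos (by decide)]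
  have hB : postprocess_value_alt (cells[y][x]) = "." := by
    rw [alt_eq_tail _ hspec hstar0]
    have hcore : pvB_takeCore (cells[y][x]).toList = [] := by
      rw [hclist]; simp [pvB_takeCore]
    rw [hcore]
    have he : String.ofList ([] : List Char) = "" := by decide
    rw [he, pvTail, if_neg (by decide), if_neg (by decide), if_pos rfl]
  rw [hA, hB] at h3
  exact absurd h3 (by decide)
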